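-- pv_equiv track=rewrite | github.com/ryobassk/CPPB-Net | function/train/DataObject.py | ChordFitNote
-- ===== SOURCE A (Python) =====
-- def ChordFitNote(SectionChord, SectionNoteNum, windowLen):
--     # 各音符情報ごとのコード進行情報の取得
--     StrChord = []                # 音符情報に対応した　window幅コード進行情報の 保存先
--     IndivSectionChordRoot = []   # 各小節ごとのコード進行情報（コードのルート）
--     IndivSectionChordKind = []   # 各小節ごとのコード進行情報（コードの種類）
--     ChordwindowLen = 3 *2        # 取得するコード進行の小節数（３小節）idxは0.5拍単位なので2倍する
--
--     # 各小節ごとのコード進行情報を取得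
--     # (3 小節分のコード進行：現在の小節、前後の小節のコード)
--     startidx = 0
--     for idx in range(windowLen):
--         IndivSectionChordRoot.append(SectionChord[0][startidx:startidx+ChordwindowLen])
--         IndivSectionChordKind.append(SectionChord[1][startidx:startidx+ChordwindowLen])
--         startidx += 2
--
--     # 音符情報にコード進行情報を対応させる
--     # 各音符ごとのコード進行情報に変形
--     for chordnotenum, SecChordRoot, SecChordKind, in zip(SectionNoteNum, IndivSectionChordRoot,  IndivSectionChordKind):
--         for idx in range(chordnotenum):  # 各小節の音符数(chordnotenum)分追加
--             StrChord.append([SecChordRoot, SecChordKind])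
--     return StrChord
-- ===== SOURCE B (Python) =====
-- def ChordFitNote(SectionChord, SectionNoteNum, windowLen):
--     # Sliding-window: keep the current 3-bar (6 half-beat) window and advance it
--     # incrementally by shifting off 2 entries and appending the next 2, instead
--     # of re-slicing the chord rows for every bar.
--     StrChord = []
--     if windowLen > 0:
--         row0, row1 = SectionChord[0], SectionChord[1]
--         root, kind = row0[:6], row1[:6]
--         for i, n in enumerate(SectionNoteNum[:windowLen]):
--             StrChord.extend([[root, kind]] * n)
--             root = root[2:] + row0[2 * i + 6:2 * i + 8]
--             kind = kind[2:] + row1[2 * i + 6:2 * i + 8]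
--     return StrChord
-- ===== Notes on version B (the rewrite author's own statement) =====
-- stated objective: faster
-- what changed: Replaces A's staged window-table construction (fresh slice per bar, then a zip with per-note inner append loops) by a single sliding-window pass: the current 6-entry chord window is advanced incrementally (shift off 2, append the next 2) and emitted by list repetition instead of a per-note loop.
import Mathlib
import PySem

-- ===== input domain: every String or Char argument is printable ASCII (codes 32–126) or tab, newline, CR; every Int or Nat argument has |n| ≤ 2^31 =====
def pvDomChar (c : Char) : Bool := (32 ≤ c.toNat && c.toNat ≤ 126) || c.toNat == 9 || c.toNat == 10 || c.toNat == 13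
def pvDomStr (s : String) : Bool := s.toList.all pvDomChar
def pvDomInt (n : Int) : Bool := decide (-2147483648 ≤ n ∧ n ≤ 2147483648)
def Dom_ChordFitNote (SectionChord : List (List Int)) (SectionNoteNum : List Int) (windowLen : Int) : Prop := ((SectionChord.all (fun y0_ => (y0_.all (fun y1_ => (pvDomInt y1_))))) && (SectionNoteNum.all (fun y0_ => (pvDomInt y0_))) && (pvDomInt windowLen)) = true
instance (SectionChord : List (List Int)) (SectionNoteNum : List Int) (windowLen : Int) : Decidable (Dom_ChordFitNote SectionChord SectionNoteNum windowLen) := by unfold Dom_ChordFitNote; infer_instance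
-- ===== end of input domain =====

-- B replaces A's staged window-table build by a sliding window advanced incrementally; equivalence of return values.

-- ===== PORT A =====
-- literal transliteration: first loop builds the two window tables while stepping startidx by 2,
-- second loop appends [root, kind] once per note via an inner range loop.
def ChordFitNote (SectionChord : List (List Int)) (SectionNoteNum : List Int) (windowLen : Int) : List (List (List Int)) :=
  let ChordwindowLen : Int := 3 * 2
  let st :=
    (PySem.List.pyRange 0 windowLen 1).foldl
      (fun (st : List (List Int) × List (List Int) × Int) _idx =>
        (st.1 ++ [PySem.List.slice (PySem.List.pyGetD SectionChord 0 []) (some st.2.2) (some (st.2.2 + ChordwindowLen))],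
         st.2.1 ++ [PySem.List.slice (PySem.List.pyGetD SectionChord 1 []) (some st.2.2) (some (st.2.2 + ChordwindowLen))],
         st.2.2 + 2))
      ([], [], 0)
  (SectionNoteNum.zip (st.1.zip st.2.1)).foldl
    (fun StrChord p =>
      (PySem.List.pyRange 0 p.1 1).foldl (fun acc _idx => acc ++ [[p.2.1, p.2.2]]) StrChord)
    []

-- ===== PORT B =====
-- literal transliteration of Source B: guard windowLen > 0, initial windows row[:6], then one pass over
-- enumerate(SectionNoteNum[:windowLen]) emitting the current windows and sliding them by 2.
def ChordFitNote_alt (SectionChord : List (List Int)) (SectionNoteNum : List Int) (windowLen : Int) : List (List (List Int)) :=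
  if 0 < windowLen then
    let row0 := PySem.List.pyGetD SectionChord 0 []
    let row1 := PySem.List.pyGetD SectionChord 1 []
    let st :=
      (PySem.List.enumerate (PySem.List.slice SectionNoteNum none (some windowLen))).foldl
        (fun (st : List (List (List Int)) × List Int × List Int) p =>
          (st.1 ++ PySem.List.pyRepeat [[st.2.1, st.2.2]] p.2,
           PySem.List.slice st.2.1 (some 2) none ++ PySem.List.slice row0 (some (2 * p.1 + 6)) (some (2 * p.1 + 8)),
           PySem.List.slice st.2.2 (some 2) none ++ PySem.List.slice row1 (some (2 * p.1 + 6)) (some (2 * p.1 + 8))))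
        ([], PySem.List.slice row0 none (some 6), PySem.List.slice row1 none (some 6))
    st.1
  else []

-- ===== PRECONDITION & SPEC =====
-- A indexes SectionChord[0] and SectionChord[1] whenever windowLen > 0; Pre_ excludes exactly the
-- inputs where that raises IndexError.
def Pre_ChordFitNote (SectionChord : List (List Int)) (SectionNoteNum : List Int) (windowLen : Int) : Prop :=
  0 < windowLen → 2 ≤ SectionChord.length
instance (SectionChord : List (List Int)) (SectionNoteNum : List Int) (windowLen : Int) : Decidable (Pre_ChordFitNote SectionChord SectionNoteNum windowLen) := by unfold Pre_ChordFitNote; infer_instance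
def pvWitness_ChordFitNote : List (List Int) × List Int × Int :=
  ([[1,2,3,4,5,6,7,8],[9,10,11,12,13,14,15,16]], [2,1,3], 3)
def Spec_ChordFitNote (SectionChord : List (List Int)) (SectionNoteNum : List Int) (windowLen : Int) (out : List (List (List Int))) : Prop := out = ChordFitNote_alt SectionChord SectionNoteNum windowLen
instance (SectionChord : List (List Int)) (SectionNoteNum : List Int) (windowLen : Int) (out : List (List (List Int))) : Decidable (Spec_ChordFitNote SectionChord SectionNoteNum windowLen out) := by unfold Spec_ChordFitNote; infer_instance

-- ===== CLAIM (what is proved, stated in full; the proofs are below) =====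
def Claim_equal_ChordFitNote : Prop := ∀ (SectionChord : List (List Int)) (SectionNoteNum : List Int) (windowLen : Int), Dom_ChordFitNote SectionChord SectionNoteNum windowLen → Pre_ChordFitNote SectionChord SectionNoteNum windowLen → Spec_ChordFitNote SectionChord SectionNoteNum windowLen (ChordFitNote SectionChord SectionNoteNum windowLen)

-- ===== LEMMAS AND PROOFS =====

-- canonical value both programs compute: per bar i, the window pair repeated per that bar's note count
def pvCanon (row0 row1 : List Int) : List Int → Nat → List (List (List Int))
  | [], _ => []
  | n :: ns, i =>
      PySem.List.pyRepeat [[(row0.drop (2 * i)).take 6, (row1.drop (2 * i)).take 6]] n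
        ++ pvCanon row0 row1 ns (i + 1)

-- sliding a window by 2: shift off 2 entries and append the next 2
theorem pvSlide (l : List Int) (a : Nat) :
    (((l.drop a).take 6).drop 2) ++ ((l.drop (a + 6)).take 2) = (l.drop (a + 2)).take 6 := by
  rw [List.drop_take, List.drop_drop]
  have h2 : a + 2 + 4 = a + 6 := by omega
  have h3 : (l.drop (a + 2)).take 6 = (l.drop (a + 2)).take 4 ++ ((l.drop (a + 2)).drop 4).take 2 := by
    rw [← List.take_add]
  rw [h3, List.drop_drop, h2]

-- A's first loop: starting from state (r, k, 2*a), folding over range a..b appends exactly the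
-- windows [2*i, 2*i+6) for i = a..b-1 and ends with counter 2*a + 2*(b-a).toNat.
theorem pvLoopA (row0 row1 : List Int) :
    ∀ (a b : Int) (r k : List (List Int)),
      (PySem.List.pyRange a b 1).foldl
        (fun (st : List (List Int) × List (List Int) × Int) _idx =>
          (st.1 ++ [PySem.List.slice row0 (some st.2.2) (some (st.2.2 + 3 * 2))],
           st.2.1 ++ [PySem.List.slice row1 (some st.2.2) (some (st.2.2 + 3 * 2))],
           st.2.2 + 2))
        (r, k, 2 * a)
      = (r ++ (PySem.List.pyRange a b 1).map (fun i => PySem.List.slice row0 (some (2 * i)) (some (2 * i + 6))),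
         k ++ (PySem.List.pyRange a b 1).map (fun i => PySem.List.slice row1 (some (2 * i)) (some (2 * i + 6))),
         2 * a + 2 * ((b - a).toNat : Int)) := by
  intro a b
  by_cases h : a < b
  · intro r k
    rw [PySem.List.pyRange_one_cons h]
    simp only [List.foldl_cons, List.map_cons]
    have := pvLoopA row0 row1 (a + 1) b
      (r ++ [PySem.List.slice row0 (some (2 * a)) (some (2 * a + 3 * 2))])
      (k ++ [PySem.List.slice row1 (some (2 * a)) (some (2 * a + 3 * 2))])
    have h2 : 2 * a + 2 = 2 * (a + 1) := by ring
    rw [h2, this]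
    refine Prod.ext (by simp) (Prod.ext (by simp) ?_)
    simp
    omega
  · intro r k
    rw [PySem.List.pyRange_one_eq_nil (by omega)]
    simp
    omega
termination_by a b => (b - a).toNat
decreasing_by omega

-- A's second loop over zip(ns, windows-from-i..b) equals the canonical value of the truncated list.
theorem pvACanon (row0 row1 : List Int) :
    ∀ (ns : List Int) (i : Nat) (b : Int) (acc : List (List (List Int))),
      (ns.zip (((PySem.List.pyRange (i : Int) b 1).map (fun j => PySem.List.slice row0 (some (2 * j)) (some (2 * j + 6)))).zip
               ((PySem.List.pyRange (i : Int) b 1).map (fun j => PySem.List.slice row1 (some (2 * j)) (some (2 * j + 6)))))).foldl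
        (fun StrChord p =>
          (PySem.List.pyRange 0 p.1 1).foldl (fun acc2 _idx => acc2 ++ [[p.2.1, p.2.2]]) StrChord)
        acc
      = acc ++ pvCanon row0 row1 (ns.take (b - (i : Int)).toNat) i := by
  intro ns
  induction ns with
  | nil => intro i b acc; simp [pvCanon]
  | cons n ns ih =>
    intro i b acc
    by_cases h : (i : Int) < b
    · rw [PySem.List.pyRange_one_cons h]
      simp only [List.map_cons, List.zip_cons_cons, List.foldl_cons]
      have hcast : (i : Int) + 1 = ((i + 1 : Nat) : Int) := by push_cast; ring
      rw [hcast, ih (i + 1) b]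
      have htake : (n :: ns).take (b - (i : Int)).toNat
          = n :: ns.take (b - ((i + 1 : Nat) : Int)).toNat := by
        have : (b - (i : Int)).toNat = (b - ((i + 1 : Nat) : Int)).toNat + 1 := by
          push_cast; omega
        rw [this, List.take_succ_cons]
      rw [htake]
      show _ = acc ++ pvCanon row0 row1 (n :: ns.take (b - ((i+1 : Nat) : Int)).toNat) i
      rw [pvCanon]
      rw [PySem.List.foldl_append_singleton_eq_map, PySem.List.pyRepeat_singleton]
      have hw0 : PySem.List.slice row0 (some (2 * (i : Int))) (some (2 * (i : Int) + 6))
          = (row0.drop (2 * i)).take 6 := by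
        have := PySem.List.slice_natCast_add row0 (2 * i) 6
        push_cast at this ⊢; rw [← this]
      have hw1 : PySem.List.slice row1 (some (2 * (i : Int))) (some (2 * (i : Int) + 6))
          = (row1.drop (2 * i)).take 6 := by
        have := PySem.List.slice_natCast_add row1 (2 * i) 6
        push_cast at this ⊢; rw [← this]
      simp [hw0, hw1, PySem.List.length_pyRange_one, List.append_assoc]
    · rw [PySem.List.pyRange_one_eq_nil (by omega)]
      have : (b - (i : Int)).toNat = 0 := by omega
      simp [this, pvCanon]

-- B's pass: from bar index i with the current windows, the fold produces the canonical value.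
theorem pvBCanon (row0 row1 : List Int) :
    ∀ (ns : List Int) (i : Nat) (acc : List (List (List Int))),
      ((PySem.List.enumerate ns (i : Int)).foldl
        (fun (st : List (List (List Int)) × List Int × List Int) p =>
          (st.1 ++ PySem.List.pyRepeat [[st.2.1, st.2.2]] p.2,
           PySem.List.slice st.2.1 (some 2) none ++ PySem.List.slice row0 (some (2 * p.1 + 6)) (some (2 * p.1 + 8)),
           PySem.List.slice st.2.2 (some 2) none ++ PySem.List.slice row1 (some (2 * p.1 + 6)) (some (2 * p.1 + 8))))
        (acc, (row0.drop (2 * i)).take 6, (row1.drop (2 * i)).take 6)).1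
      = acc ++ pvCanon row0 row1 ns i := by
  intro ns
  induction ns with
  | nil => intro i acc; simp [pvCanon, PySem.List.enumerate]
  | cons n ns ih =>
    intro i acc
    rw [PySem.List.enumerate_cons, List.foldl_cons]
    have hs2 : ∀ (l : List Int), PySem.List.slice l (some 2) none = l.drop 2 := by
      intro l
      have := PySem.List.slice_from_natCast l 2
      simpa using this
    have hnext : ∀ (row : List Int),
        PySem.List.slice ((row.drop (2 * i)).take 6) (some 2) none
          ++ PySem.List.slice row (some (2 * (i : Int) + 6)) (some (2 * (i : Int) + 8))
        = (row.drop (2 * (i + 1))).take 6 := by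
      intro row
      rw [hs2]
      have hc : PySem.List.slice row (some (2 * (i : Int) + 6)) (some (2 * (i : Int) + 8))
          = (row.drop (2 * i + 6)).take 2 := by
        have h := PySem.List.slice_natCast_add row (2 * i + 6) 2
        push_cast at h ⊢
        have h8 : 2 * (i : Int) + 6 + 2 = 2 * (i : Int) + 8 := by ring
        rw [h8] at h; exact h
      rw [hc]
      have := pvSlide row (2 * i)
      have h2 : 2 * i + 2 = 2 * (i + 1) := by omega
      rw [h2] at this
      exact this
    have hcast : (i : Int) + 1 = ((i + 1 : Nat) : Int) := by push_cast; ring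
    simp only [hnext, hcast]
    rw [ih (i + 1)]
    rw [pvCanon]
    simp [List.append_assoc]

-- ===== VERDICT (by name: the statement is the Claim_ definition above) =====
theorem ChordFitNote_spec : Claim_equal_ChordFitNote := by
  unfold Claim_equal_ChordFitNote
  intro SC SNN wL _ _
  unfold Spec_ChordFitNote ChordFitNote ChordFitNote_alt
  dsimp only
  have hA := pvLoopA (PySem.List.pyGetD SC 0 []) (PySem.List.pyGetD SC 1 []) 0 wL [] []
  simp only [mul_zero] at hA
  rw [hA]
  dsimp only
  simp only [List.nil_append]
  by_cases h : 0 < wL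
  · simp only [if_pos h]
    have hA2 := pvACanon (PySem.List.pyGetD SC 0 []) (PySem.List.pyGetD SC 1 []) SNN 0 wL []
    simp only [Nat.cast_zero, sub_zero, List.nil_append] at hA2
    rw [hA2]
    have hsl : PySem.List.slice SNN none (some wL) = SNN.take wL.toNat :=
      PySem.List.slice_to SNN (by omega)
    have hB := pvBCanon (PySem.List.pyGetD SC 0 []) (PySem.List.pyGetD SC 1 []) (SNN.take wL.toNat) 0 []
    simp only [Nat.cast_zero, Nat.mul_zero, List.drop_zero, List.nil_append] at hB
    rw [hsl]
    have h6 : ∀ (row : List Int), PySem.List.slice row none (some 6) = row.take 6 := by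
      intro row
      have := PySem.List.slice_to row (b := 6) (by omega)
      simpa using this
    rw [← hB, h6, h6]
  · simp only [if_neg h]
    rw [PySem.List.pyRange_one_eq_nil (by omega)]
    simp
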